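-- pv_equiv track=rewrite | github.com/babafemisorinolu/CS541-AgileSoftwareDevelopment | general_functions.py | multipleBirths
-- ===== SOURCE A (Python) =====
-- def multipleBirths(birthdates):
--     birthdate_counts = {}
--     for date in birthdates:
--         if date in birthdate_counts:
--             birthdate_counts[date] += 1
--         else:
--             birthdate_counts[date] = 1
--
--     for count in birthdate_counts.values():
--         if count > 5:
--             return False
--
--     return True
-- ===== SOURCE B (Python) =====
-- def multipleBirths(birthdates):
--     run = 0
--     prev = None
--     for date in sorted(birthdates):
--         if date == prev:
--             run += 1
--             if run > 5:
--                 return False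
--         else:
--             prev = date
--             run = 1
--     return True
-- ===== Notes on version B (the rewrite author's own statement) =====
-- stated objective: alternative
-- what changed: B sorts a copy of the list and detects a date occurring more than 5 times by a single run-length scan over the sorted sequence (early exit at run > 5), instead of A's hash-map counting pass followed by a scan over the counts.
import Mathlib
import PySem

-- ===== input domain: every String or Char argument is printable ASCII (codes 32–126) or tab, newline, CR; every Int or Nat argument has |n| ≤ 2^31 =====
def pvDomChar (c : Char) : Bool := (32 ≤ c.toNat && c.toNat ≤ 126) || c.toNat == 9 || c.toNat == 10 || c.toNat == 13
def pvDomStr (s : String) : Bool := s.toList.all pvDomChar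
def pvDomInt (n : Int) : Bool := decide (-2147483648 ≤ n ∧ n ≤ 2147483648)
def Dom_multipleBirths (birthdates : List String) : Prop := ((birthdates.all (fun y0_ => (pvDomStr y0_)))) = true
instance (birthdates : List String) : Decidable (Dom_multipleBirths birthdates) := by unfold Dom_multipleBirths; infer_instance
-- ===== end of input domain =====

-- B sorts a copy of the list and detects an over-represented date by one run-length scan
-- over the sorted sequence, instead of A's hash-map counting pass plus a scan over the counts.

-- ===== PORT A =====
-- 'for count in …: if count > 5: return False' then 'return True'
def pvScanCounts : List Int → Bool
  | [] => true
  | c :: rest => if c > 5 then false else pvScanCounts rest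

def multipleBirths (birthdates : List String) : Bool :=
  let birthdate_counts :=
    birthdates.foldl (fun d date =>
      if d.contains date then d.insert date (d.getD date 0 + 1)
      else d.insert date 1) PySem.Dict.empty
  pvScanCounts birthdate_counts.values

-- ===== PORT B =====
-- the 'for date in sorted(birthdates)' loop carrying (prev, run), with the early return
def pvRunScan : List String → Option String → Int → Bool
  | [], _, _ => true
  | date :: rest, prev, run =>
    if prev = some date then
      if run + 1 > 5 then false else pvRunScan rest prev (run + 1)
    else pvRunScan rest (some date) 1

def multipleBirths_alt (birthdates : List String) : Bool :=
  pvRunScan (PySem.List.sorted birthdates (fun x => x) false) none 0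

-- ===== PRECONDITION & SPEC =====
def Spec_multipleBirths (birthdates : List String) (out : Bool) : Prop := out = multipleBirths_alt birthdates
instance (birthdates : List String) (out : Bool) : Decidable (Spec_multipleBirths birthdates out) := by unfold Spec_multipleBirths; infer_instance

-- ===== CLAIM (what is proved, stated in full; the proofs are below) =====
def Claim_equal_multipleBirths : Prop := ∀ (birthdates : List String), Dom_multipleBirths birthdates → Spec_multipleBirths birthdates (multipleBirths birthdates)

-- ===== LEMMAS AND PROOFS =====

-- Both sides are bridged to this common characterisation: every multiplicity is ≤ 5.
def pvAllLE5 (xs : List String) : Bool := xs.all (fun d => decide (xs.count d ≤ 5))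

-- ---- A-side ----

-- A's hand-written counting loop is Counter(xs): both branches insert (old count + 1).
theorem pvFold_eq_insert (xs : List String) (d : PySem.Dict String Int) :
    xs.foldl (fun d date =>
      if d.contains date then d.insert date (d.getD date 0 + 1)
      else d.insert date 1) d
    = xs.foldl (fun d date => d.insert date (d.getD date 0 + 1)) d := by
  induction xs generalizing d with
  | nil => rfl
  | cons x rest ih =>
    simp only [List.foldl_cons]
    rw [show (if d.contains x then d.insert x (d.getD x 0 + 1) else d.insert x 1)
          = d.insert x (d.getD x 0 + 1) from ?_, ih]
    by_cases h : d.contains x = true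
    · simp [h]
    · simp only [Bool.not_eq_true] at h
      rw [if_neg (by simp [h]),
        PySem.Dict.getD_of_get?_eq_none d 0 ((PySem.Dict.get?_eq_none_iff_contains d x).mpr h)]
      norm_num

theorem pvScanCounts_eq_all (vs : List Int) :
    pvScanCounts vs = vs.all (fun c => decide (c ≤ 5)) := by
  induction vs with
  | nil => rfl
  | cons c rest ih =>
    simp only [pvScanCounts, List.all_cons, ih]
    by_cases h : c > 5
    · simp [h]
    · simp [h]
      omega

theorem pvA_eq_allLE5 (xs : List String) : multipleBirths xs = pvAllLE5 xs := by
  unfold multipleBirths pvAllLE5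
  rw [pvFold_eq_insert, PySem.Dict.foldl_insert_getD_add_one_eq_counter, pvScanCounts_eq_all,
    PySem.Dict.values_eq_map_keys _ (PySem.Dict.nodup_keys_counter xs) 0]
  simp only [List.all_map, PySem.Dict.getD_counter, PySem.Dict.keys_counter]
  rw [Bool.eq_iff_iff]
  simp only [List.all_eq_true, decide_eq_true_eq, PySem.Set.mem_ofList]
  norm_num

-- ---- B-side ----

-- In a ≤-sorted list whose elements all dominate x, the x's form a prefix run.
theorem pvSortedSplit (x : String) :
    ∀ t : List String, t.Pairwise (· ≤ ·) → (∀ y ∈ t, x ≤ y) →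
    ∃ r, t = List.replicate (t.count x) x ++ r ∧ x ∉ r ∧ r.Pairwise (· ≤ ·) := by
  intro t
  induction t with
  | nil => intro _ _; exact ⟨[], by simp⟩
  | cons a t' ih =>
    intro hp hb
    by_cases hax : a = x
    · subst hax
      obtain ⟨r, ht', hnr, hpr⟩ := ih (hp.of_cons) (fun y hy => (List.pairwise_cons.mp hp).1 y hy)
      refine ⟨r, ?_, hnr, hpr⟩
      rw [List.count_cons_self, List.replicate_succ, List.cons_append, ← ht']
    · have hx : x ∉ a :: t' := by
        intro hmem
        rcases List.mem_cons.mp hmem with h | hmem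
        · exact hax h.symm
        · exact hax (le_antisymm ((List.pairwise_cons.mp hp).1 x hmem) (hb a (by simp)))
      refine ⟨a :: t', ?_, hx, hp⟩
      rw [List.count_eq_zero.mpr hx, List.replicate_zero, List.nil_append]

-- Consuming a run of m copies of the current value just adds m to the counter
-- (the early exit fires exactly when the total exceeds 5).
theorem pvRunScan_replicate (x : String) :
    ∀ (m : Nat) (r : List String) (k : Int), k ≤ 5 →
    pvRunScan (List.replicate m x ++ r) (some x) k
      = if k + m > 5 then false else pvRunScan r (some x) (k + m) := by
  intro m
  induction m with
  | zero => intro r k hk; rw [if_neg (by push_cast; omega)]; simp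
  | succ m ih =>
    intro r k hk
    rw [List.replicate_succ, List.cons_append]
    show (if some x = some x then
        if k + 1 > 5 then false
        else pvRunScan (List.replicate m x ++ r) (some x) (k + 1)
      else pvRunScan (List.replicate m x ++ r) (some x) 1) = _
    rw [if_pos rfl]
    by_cases h1 : k + 1 > 5
    · rw [if_pos h1, if_pos (by push_cast; omega)]
    · rw [if_neg h1, ih r (k + 1) (by omega)]
      have hc : ((m : Int) + 1) = (((m + 1 : Nat)) : Int) := by push_cast; ring
      have h2 : k + 1 + (m : Int) = k + (((m + 1 : Nat)) : Int) := by push_cast; ring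
      rw [h2]

-- Once the next element differs from prev, the carried (prev, run) state is irrelevant.
theorem pvRunScan_reset (r : List String) (x : String) (k : Int) (hx : x ∉ r) :
    pvRunScan r (some x) k = pvRunScan r none 0 := by
  cases r with
  | nil => rfl
  | cons a rest =>
    have hax : ¬ (some x = some a) := by
      simp only [Option.some.injEq]; rintro rfl; exact hx (by simp)
    simp [pvRunScan, hax]

theorem pvRunScan_sorted :
    ∀ (n : Nat) (ys : List String), ys.length ≤ n → ys.Pairwise (· ≤ ·) →
    pvRunScan ys none 0 = pvAllLE5 ys := by
  intro n
  induction n with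
  | zero =>
    intro ys hlen _
    have : ys = [] := List.eq_nil_of_length_eq_zero (Nat.le_zero.mp hlen)
    subst this; rfl
  | succ n ih =>
    intro ys hlen hp
    cases ys with
    | nil => rfl
    | cons x t =>
      obtain ⟨r, ht, hnr, hpr⟩ :=
        pvSortedSplit x t hp.of_cons (fun y hy => (List.pairwise_cons.mp hp).1 y hy)
      set m := t.count x with hm
      have hstep : pvRunScan (x :: t) none 0 = pvRunScan t (some x) 1 := by
        simp [pvRunScan]
      have hrlen : r.length ≤ n := by
        have h1 := hlen
        have h2 : t.length = m + r.length := by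
          rw [ht]; simp
        simp only [List.length_cons] at h1
        omega
      have hcx : (x :: t).count x = m + 1 := by
        rw [List.count_cons_self, hm]
      have hcz : ∀ z ∈ r, (x :: t).count z = r.count z := by
        intro z hz
        have hzx : z ≠ x := fun h => hnr (h ▸ hz)
        have hz0 : List.count z (List.replicate m x) = 0 :=
          List.count_eq_zero.mpr (fun h => hzx (List.eq_of_mem_replicate h))
        rw [List.count_cons_of_ne (Ne.symm hzx), ht, List.count_append, hz0, Nat.zero_add]
      have hall : pvAllLE5 (x :: t) = (decide ((m + 1 : Nat) ≤ 5) && pvAllLE5 r) := by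
        unfold pvAllLE5
        rw [Bool.eq_iff_iff]
        simp only [Bool.and_eq_true, List.all_eq_true, decide_eq_true_eq]
        constructor
        · intro h
          refine ⟨by rw [← hcx]; exact h x (by simp), fun z hz => ?_⟩
          rw [← hcz z hz]
          exact h z (by
            rw [ht]
            exact List.mem_cons_of_mem _ (List.mem_append_right _ hz))
        · rintro ⟨h1, h2⟩ z hz
          rcases List.mem_cons.mp hz with rfl | hz'
          · rw [hcx]; exact h1
          · rw [ht] at hz'
            rcases List.mem_append.mp hz' with hz' | hz'
            · rw [List.eq_of_mem_replicate hz', hcx]; exact h1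
            · rw [hcz z hz']; exact h2 z hz'
      rw [hstep]
      conv_lhs => rw [ht]
      rw [pvRunScan_replicate x m r 1 (by norm_num)]
      by_cases hbig : (1 : Int) + m > 5
      · rw [if_pos hbig, hall]
        have hne : ¬ ((m + 1 : Nat) ≤ 5) := by omega
        simp [hne]
      · rw [if_neg hbig, pvRunScan_reset r x _ hnr, ih r hrlen hpr, hall]
        have hle : (m + 1 : Nat) ≤ 5 := by omega
        simp [hle]

theorem pvB_eq_allLE5 (xs : List String) : multipleBirths_alt xs = pvAllLE5 xs := by
  unfold multipleBirths_alt
  have hperm : (PySem.List.sorted xs (fun x => x) false).Perm xs := PySem.List.sorted_perm xs _ _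
  have hp : (PySem.List.sorted xs (fun x => x) false).Pairwise (· ≤ ·) := by
    have := PySem.List.sorted_pairwise (κ := String) xs (fun x => x)
    simpa using this
  rw [pvRunScan_sorted (PySem.List.sorted xs (fun x => x) false).length _ le_rfl hp]
  unfold pvAllLE5
  rw [Bool.eq_iff_iff]
  simp only [List.all_eq_true, decide_eq_true_eq]
  constructor
  · intro h z hz
    rw [← hperm.count_eq]
    exact h z (hperm.mem_iff.mpr hz)
  · intro h z hz
    rw [hperm.count_eq]
    exact h z (hperm.mem_iff.mp hz)

-- ===== VERDICT (by name: the statement is the Claim_ definition above) =====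
theorem multipleBirths_spec : Claim_equal_multipleBirths := by
  intro xs _
  unfold Spec_multipleBirths
  rw [pvA_eq_allLE5, pvB_eq_allLE5]
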